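-- pv_equiv track=rewrite | github.com/pypi-data/pypi-mirror-229 | packages/RepoDynamics/RepoDynamics-0.0.0.dev89.tar.gz/RepoDynamics-0.0.0.dev89/src/repodynamics/actions/init.py | _process_changes
-- ===== SOURCE A (Python) =====
-- def _process_changes(changes):
--     """
--
--     Parameters
--     ----------
--     changes
--
--     Returns
--     -------
--     The keys of the JSON dictionary are the groups that the files belong to,
--     defined in `.github/config/changed_files.yaml`. Another key is `all`, which is added as extra
--     (i.e. without being defined in the config file), which contains details on changes in the entire repository.
--     Each value is then a dictionary itself, as defined in the action's documentation.
--
--     Notes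
--     -----
--     The boolean values in the output are given as strings, i.e. `true` and `false`.
--
--     References
--     ----------
--     - https://github.com/marketplace/actions/changed-files
--     """
--     sep_groups = dict()
--     for item_name, val in changes.items():
--         group_name, attr = item_name.split("_", 1)
--         group = sep_groups.setdefault(group_name, dict())
--         group[attr] = val
--     for group_name, group_attrs in sep_groups.items():
--         sep_groups[group_name] = dict(sorted(group_attrs.items()))
--     return sep_groups
-- ===== SOURCE B (Python) =====
-- def _process_changes(changes):
--     pairs = [(*k.split("_", 1), v) for k, v in changes.items()]
--     order = list(dict.fromkeys(g for g, _, _ in pairs))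
--     return {g: dict(sorted((a, v) for g2, a, v in pairs if g2 == g)) for g in order}
-- ===== Notes on version B (the rewrite author's own statement) =====
-- stated objective: alternative
-- what changed: A builds a dict-of-dicts incrementally with setdefault and then re-sorts every inner dict in a second rewrite pass; B precomputes the split triples once, derives the group order as the ordered dedup of prefixes, and builds each group directly as one sorted comprehension over the filtered triples.
import Mathlib
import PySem

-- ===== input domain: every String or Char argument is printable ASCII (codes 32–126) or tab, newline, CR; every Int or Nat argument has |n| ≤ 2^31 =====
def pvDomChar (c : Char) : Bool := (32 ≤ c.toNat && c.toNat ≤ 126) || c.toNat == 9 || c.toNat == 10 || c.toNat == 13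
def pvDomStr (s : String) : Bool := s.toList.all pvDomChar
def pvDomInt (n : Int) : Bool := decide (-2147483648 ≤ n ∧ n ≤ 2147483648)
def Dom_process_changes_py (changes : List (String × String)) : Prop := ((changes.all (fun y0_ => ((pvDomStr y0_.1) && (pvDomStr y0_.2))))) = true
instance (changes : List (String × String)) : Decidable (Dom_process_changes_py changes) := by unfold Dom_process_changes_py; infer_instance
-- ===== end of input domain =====

-- B restructures A: instead of A's incremental setdefault dict-of-dicts plus a second
-- re-sorting rewrite pass, B splits once, takes the ordered dedup of prefixes as the group
-- order, and builds each group by one filter + sort ('alternative': same cost, different shape).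

-- k.split("_", 1)  (shared helper of both ports; Pre_ guarantees exactly 2 parts)
def pvSplit1 (s : String) : List String := (PySem.Str.splitMax? s "_" 1).getD []

-- ===== PORT A =====
-- Each inner dict is sorted as dict(sorted(group_attrs.items())); sorting the pairs by their
-- FIRST component is exact here because under Pre_ the attr keys within a group are distinct,
-- so Python's tuple comparison is decided by the first component.
-- The second Python loop only overwrites the value at the key just visited, so it is a map
-- over the items of sep_groups.
def process_changes_py (changes : List (String × String)) : List (String × List (String × String)) :=
  let sep_groups :=
    changes.foldl
      (fun d kv =>
        let parts := pvSplit1 kv.1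
        let group_name := parts.getD 0 ""
        let attr := parts.getD 1 ""
        -- group = sep_groups.setdefault(group_name, dict()); group[attr] = val
        -- (the in-place mutation of the shared inner dict = re-insert the updated group)
        let d' := d.setdefault group_name PySem.Dict.empty
        d'.insert group_name ((d'.getD group_name PySem.Dict.empty).insert attr kv.2))
      PySem.Dict.empty
  sep_groups.items.map
    (fun p => (p.1, (PySem.Dict.ofList (PySem.List.sorted p.2.items (fun q => q.1) false)).items))

-- ===== PORT B =====
def process_changes_py_alt (changes : List (String × String)) : List (String × List (String × String)) :=
  let pairs := changes.map (fun kv =>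
    let parts := pvSplit1 kv.1
    (parts.getD 0 "", parts.getD 1 "", kv.2))
  let order := PySem.List.dedup (pairs.map (fun t => t.1))
  order.map (fun g =>
    (g, (PySem.Dict.ofList
          (PySem.List.sorted ((pairs.filter (fun t => t.1 == g)).map (fun t => (t.2.1, t.2.2)))
            (fun q => q.1) false)).items))

-- ===== PRECONDITION & SPEC =====
-- Pre_ excludes (a) keys without an underscore, on which both A and B raise ValueError at
-- tuple unpacking, and (b) lists with duplicate keys, which a Python dict argument cannot
-- contain (the association list models the dict's items).
def Pre_process_changes_py (changes : List (String × String)) : Prop :=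
  (changes.map (fun kv => kv.1)).Nodup ∧ ∀ kv ∈ changes, '_' ∈ kv.1.toList
instance (changes : List (String × String)) : Decidable (Pre_process_changes_py changes) := by
  unfold Pre_process_changes_py; infer_instance

def pvWitness_process_changes_py : (List (String × String)) :=
  [("file_any", "true"), ("file_all", "f.txt"), ("src_any", "false")]

def Spec_process_changes_py (changes : List (String × String)) (out : List (String × List (String × String))) : Prop := out = process_changes_py_alt changes
instance (changes : List (String × String)) (out : List (String × List (String × String))) : Decidable (Spec_process_changes_py changes out) := by unfold Spec_process_changes_py; infer_instance

-- ===== CLAIM (what is proved, stated in full; the proofs are below) =====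
def Claim_equal_process_changes_py : Prop := ∀ (changes : List (String × String)), Dom_process_changes_py changes → Pre_process_changes_py changes → Spec_process_changes_py changes (process_changes_py changes)

-- ===== LEMMAS AND PROOFS =====

lemma pvGo_m0 (fuel : Nat) (l cur : List Char) (acc : List (List Char)) :
    PySem.Chars.splitOnMax.go ['_'] fuel 0 l cur acc = ((cur.reverse ++ l) :: acc).reverse := by
  cases fuel with
  | zero => simp [PySem.Chars.splitOnMax.go]
  | succ n => cases l with
    | nil => simp [PySem.Chars.splitOnMax.go]
    | cons c rest => simp [PySem.Chars.splitOnMax.go]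

lemma pvGo_main (fuel : Nat) (l cur : List Char) (acc : List (List Char))
    (hf : l.length < fuel) (h : '_' ∈ l) :
    PySem.Chars.splitOnMax.go ['_'] fuel 1 l cur acc
      = acc.reverse ++ [cur.reverse ++ l.takeWhile (fun c => !decide (c = '_')),
          l.drop ((l.takeWhile (fun c => !decide (c = '_'))).length + 1)] := by
  induction fuel generalizing l cur acc with
  | zero => omega
  | succ n ih =>
    cases l with
    | nil => simp at h
    | cons c rest =>
      by_cases hc : c = '_'
      · subst hc
        simp [PySem.Chars.splitOnMax.go, List.isPrefixOf, pvGo_m0]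
      · have hrest : '_' ∈ rest := by
          rcases List.mem_cons.mp h with h1 | h1
          · exact absurd h1.symm hc
          · exact h1
        have hlen : rest.length < n := by simp at hf; omega
        simp [PySem.Chars.splitOnMax.go, List.isPrefixOf, Ne.symm hc, hc,
          ih rest (c :: cur) acc hlen hrest]

def pvG (s : String) : String := String.ofList (s.toList.takeWhile (fun c => !decide (c = '_')))
def pvA (s : String) : String :=
  String.ofList (s.toList.drop ((s.toList.takeWhile (fun c => !decide (c = '_'))).length + 1))

lemma pvSplit1_eq (s : String) (h : '_' ∈ s.toList) :
    pvSplit1 s = [pvG s, pvA s] := by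
  have hs : ("_" : String).toList = ['_'] := by decide
  unfold pvSplit1 PySem.Str.splitMax? PySem.Chars.splitMax? PySem.Chars.splitOnMax
  rw [hs]
  simp only [List.isEmpty_cons, Bool.false_eq_true, if_false, Int.toNat_one,
    show ¬((1:Int) < 0) by norm_num, Option.map_some, Option.getD_some]
  rw [pvGo_main (s.toList.length + 1) s.toList [] [] (by omega) h]
  simp [pvG, pvA]

lemma pvRecon (l : List Char) (h : '_' ∈ l) :
    l.takeWhile (fun c => !decide (c = '_')) ++ '_' :: l.drop ((l.takeWhile (fun c => !decide (c = '_'))).length + 1) = l := by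
  induction l with
  | nil => simp at h
  | cons c rest ih =>
    by_cases hc : c = '_'
    · subst hc; simp
    · have hr : '_' ∈ rest := by
        rcases List.mem_cons.mp h with h1 | h1
        · exact absurd h1.symm hc
        · exact h1
      simp [hc, ih hr]

lemma pvInj {s t : String} (hs : '_' ∈ s.toList) (ht : '_' ∈ t.toList)
    (hg : pvG s = pvG t) (ha : pvA s = pvA t) : s = t := by
  have hg' := congrArg String.toList hg
  have ha' := congrArg String.toList ha
  simp only [pvG, pvA, String.toList_ofList] at hg' ha'
  have h1 := pvRecon s.toList hs
  rw [ha', hg', pvRecon t.toList ht] at h1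
  exact String.toList_inj.mp h1.symm

lemma pvOfList_snoc (xs : List (String × String)) (p : String × String) :
    PySem.Dict.ofList (xs ++ [p]) = (PySem.Dict.ofList xs).insert p.1 p.2 := by
  simp [PySem.Dict.ofList, PySem.Dict.update, List.foldl_append]

def pvGroups (l : List (String × String)) : PySem.Dict String (PySem.Dict String String) :=
  l.foldl
    (fun d kv => d.insert (pvG kv.1) ((d.getD (pvG kv.1) PySem.Dict.empty).insert (pvA kv.1) kv.2))
    PySem.Dict.empty

lemma pvGroups_items (l : List (String × String)) :
    (pvGroups l).items
      = (PySem.List.dedup (l.map (fun kv => pvG kv.1))).map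
          (fun g => (g, PySem.Dict.ofList
            ((l.filter (fun kv => pvG kv.1 == g)).map (fun kv => (pvA kv.1, kv.2))))) := by
  induction l using List.reverseRecOn with
  | nil => rfl
  | append_singleton l x ih =>
    have hstep : pvGroups (l ++ [x])
        = (pvGroups l).insert (pvG x.1)
            (((pvGroups l).getD (pvG x.1) PySem.Dict.empty).insert (pvA x.1) x.2) := by
      simp [pvGroups, List.foldl_append]
    have hkeys : (pvGroups l).keys = PySem.List.dedup (l.map (fun kv => pvG kv.1)) := by
      show (pvGroups l).items.map (fun p => p.1) = _
      rw [ih, List.map_map]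
      simp only [Function.comp_def]
      simp
    have hnodup : (pvGroups l).keys.Nodup := by
      rw [hkeys]; exact PySem.Set.nodup_ofList _
    have hmapped : (l ++ [x]).map (fun kv => pvG kv.1)
        = l.map (fun kv => pvG kv.1) ++ [pvG x.1] := by simp
    by_cases hmem : pvG x.1 ∈ PySem.List.dedup (l.map (fun kv => pvG kv.1))
    · -- existing group: the insert overwrites in place
      have hmem' : pvG x.1 ∈ l.map (fun kv => pvG kv.1) := (PySem.Set.mem_ofList _ _).mp hmem
      have hcont : (pvGroups l).contains (pvG x.1) = true :=
        (PySem.Dict.contains_iff_mem_keys _ _).mpr (hkeys ▸ hmem)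
      have hgd : (pvGroups l).getD (pvG x.1) PySem.Dict.empty
          = PySem.Dict.ofList ((l.filter (fun kv => pvG kv.1 == pvG x.1)).map (fun kv => (pvA kv.1, kv.2))) := by
        apply PySem.Dict.getD_of_mem_items _ _ hnodup
        rw [ih]
        exact List.mem_map.mpr ⟨pvG x.1, hmem, rfl⟩
      rw [hstep, PySem.Dict.items_insert_of_contains _ _ hcont, ih, hgd, hmapped,
        List.map_map]
      rw [show PySem.List.dedup (l.map (fun kv => pvG kv.1) ++ [pvG x.1])
            = PySem.List.dedup (l.map (fun kv => pvG kv.1)) by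
          simp only [PySem.List.dedup, PySem.Set.ofList_append_singleton]
          exact PySem.Set.add_of_mem ((PySem.Set.mem_ofList _ _).mpr hmem')]
      apply List.map_congr_left
      intro g hg
      by_cases hgx : g = pvG x.1
      · subst hgx
        simp only [Function.comp, beq_self_eq_true, if_pos]
        rw [List.filter_append, List.map_append]
        simp only [List.filter_cons, List.filter_nil, beq_self_eq_true, if_pos]
        simp [pvOfList_snoc]
      · have hne : (g == pvG x.1) = false := beq_eq_false_iff_ne.mpr hgx
        simp only [Function.comp, hne, Bool.false_eq_true, if_neg, not_false_iff]
        rw [List.filter_append]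
        simp [beq_eq_false_iff_ne.mpr (Ne.symm hgx)]
    · -- fresh group: the insert appends
      have hmem' : pvG x.1 ∉ l.map (fun kv => pvG kv.1) := fun hc => hmem ((PySem.Set.mem_ofList _ _).mpr hc)
      have hcont : (pvGroups l).contains (pvG x.1) = false := by
        apply Bool.not_eq_true _ |>.mp
        intro hc
        exact hmem (hkeys ▸ (PySem.Dict.contains_iff_mem_keys _ _).mp hc)
      have hgd : (pvGroups l).getD (pvG x.1) PySem.Dict.empty = PySem.Dict.empty :=
        PySem.Dict.getD_of_not_contains _ _ hcont
      rw [hstep, PySem.Dict.items_insert_of_not_contains _ _ hcont, ih, hgd, hmapped]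
      rw [show PySem.List.dedup (l.map (fun kv => pvG kv.1) ++ [pvG x.1])
            = PySem.List.dedup (l.map (fun kv => pvG kv.1)) ++ [pvG x.1] by
          simp only [PySem.List.dedup, PySem.Set.ofList_append_singleton]
          exact PySem.Set.add_of_not_mem (fun hc => hmem' ((PySem.Set.mem_ofList _ _).mp hc))]
      rw [List.map_append]
      congr 1
      · apply List.map_congr_left
        intro g hg
        have hgx : g ≠ pvG x.1 := by
          intro hc; subst hc; exact hmem hg
        rw [List.filter_append]
        simp [beq_eq_false_iff_ne.mpr (Ne.symm hgx)]
      · have hfilt : l.filter (fun kv => pvG kv.1 == pvG x.1) = [] := by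
          apply List.filter_eq_nil_iff.mpr
          intro kv hkv hbeq
          exact hmem' (List.mem_map.mpr ⟨kv, hkv, eq_of_beq hbeq⟩)
        simp only [List.map_cons, List.map_nil, List.filter_append, hfilt, List.filter_cons,
          beq_self_eq_true, if_pos, List.nil_append]
        rfl

lemma pvStep_eq (d : PySem.Dict String (PySem.Dict String String)) (kv : String × String)
    (h : '_' ∈ kv.1.toList) :
    ((d.setdefault ((pvSplit1 kv.1).getD 0 "") PySem.Dict.empty).insert ((pvSplit1 kv.1).getD 0 "")
      (((d.setdefault ((pvSplit1 kv.1).getD 0 "") PySem.Dict.empty).getD ((pvSplit1 kv.1).getD 0 "")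
          PySem.Dict.empty).insert ((pvSplit1 kv.1).getD 1 "") kv.2))
    = d.insert (pvG kv.1) ((d.getD (pvG kv.1) PySem.Dict.empty).insert (pvA kv.1) kv.2) := by
  rw [pvSplit1_eq kv.1 h]
  simp only [List.getD_cons_zero, List.getD_cons_succ]
  by_cases hc : d.contains (pvG kv.1)
  · rw [PySem.Dict.setdefault_of_contains _ _ hc]
  · have hc' : d.contains (pvG kv.1) = false := by simpa using hc
    rw [PySem.Dict.setdefault_of_not_contains _ _ hc', PySem.Dict.getD_insert_self,
      PySem.Dict.insert_insert_self, PySem.Dict.getD_of_not_contains _ _ hc']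

lemma pvItems_ofList (xs : List (String × String)) (h : (xs.map (fun p => p.1)).Nodup) :
    (PySem.Dict.ofList xs).items = xs := by
  have := PySem.Dict.items_foldl_insert_fresh xs (fun p => p.1) (fun p => p.2) PySem.Dict.empty
    (fun a _ => by simp) h
  simpa [PySem.Dict.ofList, PySem.Dict.update] using this

lemma pvAttrs_nodup (changes : List (String × String))
    (hnd : (changes.map (fun kv => kv.1)).Nodup)
    (hus : ∀ kv ∈ changes, '_' ∈ kv.1.toList) (g : String) :
    (((changes.filter (fun kv => pvG kv.1 == g)).map (fun kv => (pvA kv.1, kv.2))).map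
      (fun p => p.1)).Nodup := by
  have hrw : ((changes.filter (fun kv => pvG kv.1 == g)).map (fun kv => (pvA kv.1, kv.2))).map
        (fun p => p.1)
      = ((changes.filter (fun kv => pvG kv.1 == g)).map (fun kv => kv.1)).map pvA := by
    simp [List.map_map, Function.comp_def]
  rw [hrw]
  have hknd : ((changes.filter (fun kv => pvG kv.1 == g)).map (fun kv => kv.1)).Nodup := by
    refine List.Nodup.sublist ?_ hnd
    exact List.Sublist.map _ List.filter_sublist
  refine List.Nodup.map_on ?_ hknd
  intro k1 h1 k2 h2 heq
  obtain ⟨kv1, hkv1, rfl⟩ := List.mem_map.mp h1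
  obtain ⟨kv2, hkv2, rfl⟩ := List.mem_map.mp h2
  have hm1 := List.mem_filter.mp hkv1
  have hm2 := List.mem_filter.mp hkv2
  have hG : pvG kv1.1 = pvG kv2.1 := by
    have e1 : pvG kv1.1 = g := eq_of_beq hm1.2
    have e2 : pvG kv2.1 = g := eq_of_beq hm2.2
    rw [e1, e2]
  exact pvInj (hus kv1 hm1.1) (hus kv2 hm2.1) hG heq

-- ===== VERDICT (by name: the statement is the Claim_ definition above) =====
theorem process_changes_py_spec : Claim_equal_process_changes_py := by
  intro changes _ hpre
  obtain ⟨hnd, hus⟩ := hpre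
  unfold Spec_process_changes_py
  have hA : process_changes_py changes
      = (PySem.List.dedup (changes.map (fun kv => pvG kv.1))).map
          (fun g => (g, (PySem.Dict.ofList (PySem.List.sorted
            ((changes.filter (fun kv => pvG kv.1 == g)).map (fun kv => (pvA kv.1, kv.2)))
            (fun q => q.1) false)).items)) := by
    unfold process_changes_py
    show ((changes.foldl (fun d kv =>
        (d.setdefault ((pvSplit1 kv.1).getD 0 "") PySem.Dict.empty).insert ((pvSplit1 kv.1).getD 0 "")
          (((d.setdefault ((pvSplit1 kv.1).getD 0 "") PySem.Dict.empty).getD ((pvSplit1 kv.1).getD 0 "")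
              PySem.Dict.empty).insert ((pvSplit1 kv.1).getD 1 "") kv.2))
        PySem.Dict.empty).items.map
          (fun p => (p.1, (PySem.Dict.ofList (PySem.List.sorted p.2.items (fun q => q.1) false)).items))) = _
    rw [PySem.List.foldl_congr_mem' changes _
      (fun d kv => d.insert (pvG kv.1) ((d.getD (pvG kv.1) PySem.Dict.empty).insert (pvA kv.1) kv.2))
      PySem.Dict.empty
      (fun kv hkv d => pvStep_eq d kv (hus kv hkv))]
    rw [show (changes.foldl
        (fun d kv => d.insert (pvG kv.1) ((d.getD (pvG kv.1) PySem.Dict.empty).insert (pvA kv.1) kv.2))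
        PySem.Dict.empty) = pvGroups changes from rfl]
    rw [pvGroups_items, List.map_map]
    apply List.map_congr_left
    intro g hg
    simp only [Function.comp_def]
    rw [pvItems_ofList _ (pvAttrs_nodup changes hnd hus g)]
  have hB : process_changes_py_alt changes
      = (PySem.List.dedup (changes.map (fun kv => pvG kv.1))).map
          (fun g => (g, (PySem.Dict.ofList (PySem.List.sorted
            ((changes.filter (fun kv => pvG kv.1 == g)).map (fun kv => (pvA kv.1, kv.2)))
            (fun q => q.1) false)).items)) := by
    unfold process_changes_py_alt
    show (PySem.List.dedup ((changes.map (fun kv =>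
        ((pvSplit1 kv.1).getD 0 "", (pvSplit1 kv.1).getD 1 "", kv.2))).map (fun t => t.1))).map _ = _
    rw [List.map_congr_left (l := changes)
      (g := fun kv => (pvG kv.1, pvA kv.1, kv.2))
      (fun kv hkv => by rw [pvSplit1_eq kv.1 (hus kv hkv)]; rfl)]
    rw [List.map_map]
    apply List.map_congr_left
    intro g hg
    rw [List.filter_map, List.map_map]
    rfl
  rw [hA, hB]
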